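-- pv_equiv track=rewrite | github.com/Kikuzawa/DSTU_VKB | Methods_Programming/laboratories/1/3.py | find_best_broadcast
-- ===== SOURCE A (Python) =====
-- from itertools import combinations, product
-- from typing import List, Set, Iterable, Tuple
--
-- def find_best_broadcast(n: int, k: int, customer_counts: List[int]) -> int:
--     """
--     Находит максимальное количество покупателей, которые увидят два рекламных ролика,
--     транслируемых с учетом ограничений на время между показами.
--
--     :param n: Количество моментов времени.
--     :param k: Минимальное время между окончанием первого ролика и началом второго.
--     :param customer_counts: Список количества покупателей в каждый момент времени.
--     :return: Максимальное количество покупателей, которые увидят оба ролика.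
--     """
--     # Находим максимальное количество покупателей в любой момент времени
--     max_customers: int = max(customer_counts)
--     # Находим все моменты времени, когда количество покупателей максимально
--     max_customers_times: Set[int] = {index for index, value in enumerate(customer_counts)
--                                      if value == max_customers}
--
--     # Проверяем, есть ли два момента с максимальным количеством покупателей,
--     # между которыми прошло достаточно времени
--     for time1, time2 in combinations(max_customers_times, 2):
--         if abs(time1 - time2) > k - 1:
--             return max_customers * 2  # Если да, возвращаем удвоенное максимальное значение
--
--     # Если таких моментов нет, ищем пару (максимальный момент + другой момент),
--     # где между ними прошло достаточно времени
--     all_possible_pairs: Iterable[Tuple[int, int]] = product(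
--         max_customers_times,
--         range(len(customer_counts))
--     )
--
--     # Находим второе по величине количество покупателей, которое можно использовать
--     # в паре с максимальным, соблюдая ограничение по времени
--     second_max_customers: int = max(
--         map(
--             lambda pair: customer_counts[pair[1]],
--             filter(
--                 lambda pair: pair[0] != pair[1] and abs(pair[0] - pair[1]) > k - 1,
--                 all_possible_pairs
--             )
--         ),
--         default=0
--     )
--
--     # Если нашли подходящую пару, возвращаем сумму максимального и второго по величине
--     if second_max_customers > 0:
--         return max_customers + second_max_customers
--
--     # Если не нашли подходящих пар, перебираем все возможные пары моментов времени
--     # с учетом ограничения на минимальное время между показами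
--     max_viewers_sum: int = 0
--     for first_ad_time in range(n - k):
--         second_ad_time: int = first_ad_time + k
--         if second_ad_time < n:
--             viewers_sum: int = customer_counts[first_ad_time] + max(customer_counts[second_ad_time:n])
--             max_viewers_sum = max(max_viewers_sum, viewers_sum)
--
--     return max_viewers_sum
-- ===== SOURCE B (Python) =====
-- def find_best_broadcast(n, k, customer_counts):
--     mx = max(customer_counts)
--     f = customer_counts.index(mx)
--     l = len(customer_counts) - 1 - customer_counts[::-1].index(mx)
--     # a pair of far-apart maxima exists iff the two extreme max positions are far apart
--     if f != l and l - f >= k: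
--         return 2 * mx
--     # best partner value for a max position: a position is compatible with some max
--     # position iff it lies left of l - gap + 1 or right of f + gap - 1 (gap = max(k, 1)),
--     # so two slice maxima replace the whole product scan
--     kk = k if k > 1 else 1
--     lo = l - kk + 1
--     second = 0
--     if lo > 0:
--         second = max(second, max(customer_counts[:lo]))
--     if f + kk < len(customer_counts):
--         second = max(second, max(customer_counts[f + kk:]))
--     if second > 0:
--         return mx + second
--     # fallback scan against a precomputed suffix-max array of customer_counts[:n]
--     head = customer_counts[:n]
--     suf = [0] * len(head)
--     run = None
--     for i in range(len(head) - 1, -1, -1):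
--         run = head[i] if run is None else max(run, head[i])
--         suf[i] = run
--     best = 0
--     for i in range(n - k):
--         best = max(best, customer_counts[i] + suf[i + k])
--     return best
-- ===== Notes on version B (the rewrite author's own statement) =====
-- stated objective: faster
-- what changed: The pair scans disappear: the combinations scan becomes one comparison of the first and last max position (found by index on the list and its reverse), the product(max_times, range(n)) scan becomes two slice maxima over the regions compatible with those two extremes, and the fallback's per-iteration max(counts[i+k:n]) becomes one precomputed suffix-max array.
-- outside the precondition, e.g. on find_best_broadcast(-2, -6, [-5, -2, -6, 0, -6]): A returns 0, B raises IndexError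
import Mathlib
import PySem

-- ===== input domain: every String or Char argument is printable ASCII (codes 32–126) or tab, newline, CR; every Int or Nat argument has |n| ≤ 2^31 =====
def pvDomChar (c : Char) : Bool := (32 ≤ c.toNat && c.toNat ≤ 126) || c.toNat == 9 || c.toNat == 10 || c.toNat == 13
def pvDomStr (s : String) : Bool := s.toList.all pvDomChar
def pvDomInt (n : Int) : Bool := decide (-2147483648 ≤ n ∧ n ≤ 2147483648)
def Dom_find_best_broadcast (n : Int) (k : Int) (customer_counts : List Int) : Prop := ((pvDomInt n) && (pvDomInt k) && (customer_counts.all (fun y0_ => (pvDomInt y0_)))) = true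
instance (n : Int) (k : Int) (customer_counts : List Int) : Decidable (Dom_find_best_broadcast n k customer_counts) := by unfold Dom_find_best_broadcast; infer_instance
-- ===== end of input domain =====

-- B replaces A's pair scans (combinations, product, per-iteration slice max) by the two extreme
-- max positions, two slice maxima and a suffix-max array: same value on Pre_ (where A returns),
-- measured faster in a timing run.

-- ===== PORT A =====
-- shared helper: both Pythons collect the positions of the maximal value
-- (A builds a set of these distinct indices; the list is kept in ascending index order,
--  and both uses below — a symmetric pair test and a max over pair-values — are order-blind)
def maxIndices (cc : List Int) (mx : Int) : List Int :=
  ((PySem.List.enumerate cc).filter (fun p => p.2 == mx)).map (fun p => p.1)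

-- for time1, time2 in combinations(max_customers_times, 2): if abs(...) > k - 1: return 2*mx
def aStage1 (k : Int) (times : List Int) : Bool :=
  (PySem.List.combinations times 2).any (fun c =>
    match c with
    | [t1, t2] => decide (|t1 - t2| > k - 1)
    | _ => false)

-- second_max_customers = max(map(..., filter(..., product(times, range(len(cc))))), default=0)
def aSecond (k : Int) (cc : List Int) (times : List Int) : Int :=
  (PySem.List.max?
    (((times.flatMap (fun t => (PySem.List.pyRange 0 (cc.length : Int)).map (fun j => (t, j)))).filter
        (fun p => decide (p.1 ≠ p.2 ∧ |p.1 - p.2| > k - 1))).map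
      (fun p => PySem.List.pyGetD cc p.2 0))
    (fun x => x)).getD 0   -- max(map(..., filter(..., product)), default=0); Pre_ keeps the indexing in range

-- the final loop: for first_ad_time in range(n - k): ...
def aStage3 (n k : Int) (cc : List Int) : Int :=
  (PySem.List.pyRange 0 (n - k)).foldl (fun acc first =>
    if first + k < n then
      max acc (PySem.List.pyGetD cc first 0 +
        (PySem.List.max? (PySem.List.slice cc (some (first + k)) (some n)) (fun x => x)).getD 0)
    else acc) 0

def find_best_broadcast (n : Int) (k : Int) (customer_counts : List Int) : Int :=
  let mx := (PySem.List.max? customer_counts (fun x => x)).getD 0  -- max(cc); Pre_ excludes []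
  let times := maxIndices customer_counts mx
  if aStage1 k times then 2 * mx
  else
    let second := aSecond k customer_counts times
    if second > 0 then mx + second
    else aStage3 n k customer_counts

-- ===== PORT B =====
-- suffix-max array built by B's backward running-max loop
def suffixMax : List Int → List Int
  | [] => []
  | x :: xs =>
    match suffixMax xs with
    | [] => [x]
    | y :: ys => max x y :: y :: ys

-- stage 2 by two slice maxima: a position is compatible with some max position iff it
-- lies left of l - gap + 1 or right of f + gap - 1 (gap = max(k, 1))
def bSecond (k f l : Int) (cc : List Int) : Int :=
  let kk := if k > 1 then k else 1
  let lo := l - kk + 1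
  let second : Int := 0
  let second := if lo > 0 then
      max second ((PySem.List.max? (PySem.List.slice cc none (some lo)) (fun x => x)).getD 0)
    else second
  if f + kk < (cc.length : Int) then
    max second ((PySem.List.max? (PySem.List.slice cc (some (f + kk)) none) (fun x => x)).getD 0)
  else second

-- fallback scan against the precomputed suffix-max of cc[:n]
def bStage3 (n k : Int) (cc : List Int) : Int :=
  let suf := suffixMax (PySem.List.slice cc none (some n))
  (PySem.List.pyRange 0 (n - k)).foldl (fun best i =>
    max best (PySem.List.pyGetD cc i 0 + PySem.List.pyGetD suf (i + k) 0)) 0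

def find_best_broadcast_alt (n : Int) (k : Int) (customer_counts : List Int) : Int :=
  let mx := (PySem.List.max? customer_counts (fun x => x)).getD 0
  let f : Int := ((PySem.List.index? customer_counts mx).getD 0 : Nat)   -- cc.index(mx)
  -- cc[::-1] is customer_counts.reverse (PySem.List.slice?_none_none_neg_one)
  let l : Int := (customer_counts.length : Int) - 1 -
    ((PySem.List.index? customer_counts.reverse mx).getD 0 : Nat)
  if f ≠ l ∧ l - f ≥ k then 2 * mx
  else
    let second := bSecond k f l customer_counts
    if second > 0 then mx + second
    else bStage3 n k customer_counts

-- ===== PRECONDITION & SPEC =====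
-- Pre_ is exactly where A returns: the list is nonempty and either two far-apart maxima exist
-- (stage 1 returns), or a positive value sits far from some maximum (stage 2 returns), or the
-- fallback scan's bounds are well-formed (0 ≤ k and n ≤ len) or its range is empty (n ≤ k).
-- Excluded besides crashes: a degenerate k < 0 family where A's fallback loop runs off the list
-- yet happens to complete on a few inputs; B's loop raises IndexError there.
def Pre_find_best_broadcast (n : Int) (k : Int) (customer_counts : List Int) : Prop :=
  customer_counts ≠ [] ∧
  ((∃ i ∈ List.range customer_counts.length, ∃ j ∈ List.range customer_counts.length,
      i < j ∧
      customer_counts.getD i 0 = (PySem.List.max? customer_counts (fun x => x)).getD 0 ∧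
      customer_counts.getD j 0 = (PySem.List.max? customer_counts (fun x => x)).getD 0 ∧
      (j : Int) - (i : Int) ≥ k) ∨
   (∃ j ∈ List.range customer_counts.length, customer_counts.getD j 0 > 0 ∧
      ∃ t ∈ List.range customer_counts.length,
        customer_counts.getD t 0 = (PySem.List.max? customer_counts (fun x => x)).getD 0 ∧
        t ≠ j ∧ |(t : Int) - (j : Int)| ≥ k) ∨
   (0 ≤ k ∧ n ≤ (customer_counts.length : Int)) ∨ n ≤ k)

instance (n : Int) (k : Int) (customer_counts : List Int) : Decidable (Pre_find_best_broadcast n k customer_counts) := by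
  unfold Pre_find_best_broadcast; infer_instance

def pvWitness_find_best_broadcast : Int × Int × List Int := (4, 2, [3, 1, 0, 2])

def Spec_find_best_broadcast (n : Int) (k : Int) (customer_counts : List Int) (out : Int) : Prop := out = find_best_broadcast_alt n k customer_counts
instance (n : Int) (k : Int) (customer_counts : List Int) (out : Int) : Decidable (Spec_find_best_broadcast n k customer_counts out) := by unfold Spec_find_best_broadcast; infer_instance

-- ===== CLAIM (what is proved, stated in full; the proofs are below) =====
def Claim_equal_find_best_broadcast : Prop := ∀ (n : Int) (k : Int) (customer_counts : List Int), Dom_find_best_broadcast n k customer_counts → Pre_find_best_broadcast n k customer_counts → Spec_find_best_broadcast n k customer_counts (find_best_broadcast n k customer_counts)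

-- ===== LEMMAS AND PROOFS =====

theorem length_suffixMax (cc : List Int) : (suffixMax cc).length = cc.length := by
  induction cc with
  | nil => rfl
  | cons x xs ih =>
    simp only [suffixMax]
    cases h : suffixMax xs with
    | nil => rw [h] at ih; simp only [List.length_nil] at ih; simp [← ih]
    | cons y ys => rw [h] at ih; simp at ih ⊢; omega

theorem foldl_max_comm (l : List Int) (a b : Int) :
    l.foldl max (max a b) = max a (l.foldl max b) := by
  induction l generalizing b with
  | nil => rfl
  | cons x xs ih =>
    simp only [List.foldl_cons]
    rw [max_assoc, ih]

theorem suffixMax_spec (cc : List Int) (i : Nat) (h : i < cc.length) :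
    (suffixMax cc)[i]? = PySem.List.max? (cc.drop i) (fun x => x) := by
  induction cc generalizing i with
  | nil => simp at h
  | cons x xs ih =>
    cases i with
    | zero =>
      cases hs : suffixMax xs with
      | nil =>
        have hlen := length_suffixMax xs
        rw [hs] at hlen
        have hxs : xs = [] := by cases xs <;> simp_all
        subst hxs
        simp [suffixMax, PySem.List.max?]
      | cons y ys =>
        have hxs : xs ≠ [] := by intro hh; rw [hh] at hs; simp [suffixMax] at hs
        obtain ⟨z, zs, hx⟩ := List.exists_cons_of_ne_nil hxs
        have h0 := ih 0 (by rw [hx]; simp)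
        rw [hs] at h0
        simp only [List.getElem?_cons_zero, List.drop_zero] at h0
        rw [hx, PySem.List.max?_id_cons] at h0
        have hy : y = zs.foldl max z := by simpa using h0
        have hsm : suffixMax (x :: xs) = max x y :: y :: ys := by
          simp only [suffixMax]; rw [hs]
        rw [List.drop_zero, hsm, hx, PySem.List.max?_id_cons]
        simp only [List.getElem?_cons_zero, List.foldl_cons]
        rw [foldl_max_comm, ← hy]
    | succ j =>
      simp only [List.length_cons] at h
      have hj : j < xs.length := by omega
      have hne : suffixMax xs ≠ [] := by
        intro hs; have hl := length_suffixMax xs; rw [hs] at hl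
        have : xs = [] := by cases xs <;> simp_all
        subst this; simp at hj
      obtain ⟨y, ys, hs⟩ := List.exists_cons_of_ne_nil hne
      have hsm : suffixMax (x :: xs) = max x y :: y :: ys := by
        simp only [suffixMax]; rw [hs]
      rw [hsm, List.drop_succ_cons, List.getElem?_cons_succ, ← hs, ih j hj]

theorem mem_maxIndices (cc : List Int) (mx t : Int) :
    t ∈ maxIndices cc mx ↔ ∃ (kk : Nat) (h : kk < cc.length), t = (kk : Int) ∧ cc[kk] = mx := by
  simp only [maxIndices, List.mem_map, List.mem_filter, PySem.List.mem_enumerate_iff]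
  constructor
  · rintro ⟨⟨a, b⟩, ⟨⟨kk, hk, hab⟩, hb⟩, rfl⟩
    simp only [Prod.mk.injEq] at hab
    obtain ⟨ha, hbv⟩ := hab
    refine ⟨kk, hk, by omega, ?_⟩
    simp only at hb
    rw [← hbv]; exact (beq_iff_eq.mp hb).symm ▸ rfl
  · rintro ⟨kk, hk, rfl, hv⟩
    exact ⟨((kk : Int), cc[kk]), ⟨⟨kk, hk, by simp⟩, by simp [hv]⟩, rfl⟩

theorem pairwise_maxIndices (cc : List Int) (mx : Int) :
    (maxIndices cc mx).Pairwise (· < ·) := by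
  have h := PySem.List.pairwise_lt_enumerate cc 0
  have h2 := h.sublist (List.filter_sublist (l := PySem.List.enumerate cc 0)
      (p := fun p => p.2 == mx))
  exact (List.pairwise_map).mpr h2

theorem head_le_of_pairwise (l : List Int) (h : l.Pairwise (· < ·)) (x : Int) (hx : x ∈ l) :
    l.head?.getD 0 ≤ x := by
  cases l with
  | nil => simp at hx
  | cons a t =>
    simp only [List.head?_cons, Option.getD_some]
    rcases List.mem_cons.mp hx with rfl | hxt
    · exact le_refl x
    · exact le_of_lt ((List.pairwise_cons.mp h).1 x hxt)

theorem le_getLast_of_pairwise (l : List Int) (h : l.Pairwise (· < ·)) (x : Int) (hx : x ∈ l) :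
    x ≤ l.getLast?.getD 0 := by
  induction l generalizing x with
  | nil => simp at hx
  | cons a t ih =>
    cases t with
    | nil => simp at hx ⊢; omega
    | cons b u =>
      rw [List.getLast?_cons_cons]
      rcases List.mem_cons.mp hx with rfl | hxt
      · have hb : b ∈ b :: u := List.mem_cons_self
        have hab := (List.pairwise_cons.mp h).1 b hb
        have h2 := ih (List.pairwise_cons.mp h).2 b hb
        omega
      · exact ih (List.pairwise_cons.mp h).2 x hxt

theorem head_mem_of_ne_nil (l : List Int) (h : l ≠ []) : l.head?.getD 0 ∈ l := by
  cases l with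
  | nil => exact absurd rfl h
  | cons a t => simp

theorem getLast_mem_of_ne_nil (l : List Int) (h : l ≠ []) : l.getLast?.getD 0 ∈ l := by
  rw [List.getLast?_eq_some_getLast h]
  simp only [Option.getD_some]
  exact List.getLast_mem h

theorem maxIndices_ne_nil (cc : List Int) (hne : cc ≠ []) :
    maxIndices cc ((PySem.List.max? cc (fun x => x)).getD 0) ≠ [] := by
  obtain ⟨m, hm⟩ : ∃ m, PySem.List.max? cc (fun x => x) = some m := by
    cases h : PySem.List.max? cc (fun x => x) with
    | none => exact absurd ((PySem.List.max?_eq_none_iff cc _).mp h) hne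
    | some m => exact ⟨m, rfl⟩
  have hmem : m ∈ cc := PySem.List.max?_mem hm
  obtain ⟨kk, hk, hv⟩ := List.mem_iff_getElem.mp hmem
  intro hnil
  have : ((kk : Int)) ∈ maxIndices cc ((PySem.List.max? cc (fun x => x)).getD 0) := by
    rw [mem_maxIndices]
    exact ⟨kk, hk, rfl, by rw [hm]; simpa using hv⟩
  rw [hnil] at this
  simp at this

theorem stage1_iff (k : Int) (idx : List Int) (hp : idx.Pairwise (· < ·)) (hne : idx ≠ []) :
    aStage1 k idx = true ↔
      (idx.head?.getD 0 ≠ idx.getLast?.getD 0 ∧ idx.getLast?.getD 0 - idx.head?.getD 0 ≥ k) := by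
  unfold aStage1
  rw [List.any_eq_true]
  constructor
  · rintro ⟨c, hc, hpc⟩
    obtain ⟨hsub, hlen⟩ := (PySem.List.mem_combinations_iff idx 2 c).mp hc
    obtain ⟨a, b, rfl⟩ : ∃ a b, c = [a, b] := by
      match c, hlen with
      | [a, b], _ => exact ⟨a, b, rfl⟩
    have hab : a < b := by
      have := hp.sublist hsub
      exact (List.pairwise_cons.mp this).1 b List.mem_cons_self
    have hmem := hsub.subset
    have haf := head_le_of_pairwise idx hp a (hmem (by simp))
    have hbl := le_getLast_of_pairwise idx hp b (hmem (by simp))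
    simp only [decide_eq_true_eq] at hpc
    rw [abs_of_neg (show a - b < 0 by omega)] at hpc
    constructor
    · omega
    · omega
  · rintro ⟨hfl, hk⟩
    set f := idx.head?.getD 0 with hf
    set l := idx.getLast?.getD 0 with hl
    refine ⟨[f, l], ?_, ?_⟩
    · rw [PySem.List.mem_combinations_iff]
      constructor
      · obtain ⟨a, t, rfl⟩ := List.exists_cons_of_ne_nil hne
        have hfa : f = a := by simp [hf]
        have hlm : l ∈ a :: t := getLast_mem_of_ne_nil _ hne
        rcases List.mem_cons.mp hlm with h1 | h2
        · exact absurd (hfa.trans h1.symm) hfl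
        · rw [hfa]
          exact List.Sublist.cons₂ a (List.singleton_sublist.mpr h2)
      · rfl
    · have hfle : f ≤ l := by
        exact le_getLast_of_pairwise idx hp f (head_mem_of_ne_nil idx hne)
      simp only [decide_eq_true_eq]
      rw [abs_of_neg (show f - l < 0 by omega)]
      omega

theorem elig_iff (cc : List Int) (mx k j : Int) (hne : maxIndices cc mx ≠ []) :
    (∃ t ∈ maxIndices cc mx, t ≠ j ∧ |t - j| ≥ k) ↔
      ((j ≠ (maxIndices cc mx).head?.getD 0 ∧ |j - (maxIndices cc mx).head?.getD 0| ≥ k) ∨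
       (j ≠ (maxIndices cc mx).getLast?.getD 0 ∧ |j - (maxIndices cc mx).getLast?.getD 0| ≥ k)) := by
  set idx := maxIndices cc mx with hidx
  set f := idx.head?.getD 0 with hf
  set l := idx.getLast?.getD 0 with hl
  have hp : idx.Pairwise (· < ·) := pairwise_maxIndices cc mx
  constructor
  · rintro ⟨t, htm, htj, hgap⟩
    have h1 := head_le_of_pairwise idx hp t htm
    have h2 := le_getLast_of_pairwise idx hp t htm
    rw [← hf] at h1
    rw [← hl] at h2
    rcases lt_trichotomy t j with hlt | heq | hgt
    · left
      rw [abs_of_neg (show t - j < 0 by omega)] at hgap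
      rw [abs_of_nonneg (show (0:Int) ≤ j - f by omega)]
      exact ⟨by omega, by omega⟩
    · exact absurd heq htj
    · right
      rw [abs_of_pos (show 0 < t - j by omega)] at hgap
      rw [abs_of_nonpos (show j - l ≤ 0 by omega), neg_sub]
      exact ⟨by omega, by omega⟩
  · rintro (⟨hjf, hgap⟩ | ⟨hjl, hgap⟩)
    · exact ⟨f, head_mem_of_ne_nil idx hne, by omega, by rw [abs_sub_comm]; exact hgap⟩
    · exact ⟨l, getLast_mem_of_ne_nil idx hne, by omega, by rw [abs_sub_comm]; exact hgap⟩

theorem foldl_max_eq_of_mem_iff (lv le : List Int) (hm : ∀ x, x ∈ lv ↔ x ∈ le) :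
    le.foldl max 0 = max 0 ((PySem.List.max? lv (fun x => x)).getD 0) := by
  cases lv with
  | nil =>
    have : le = [] := by
      rw [List.eq_nil_iff_forall_not_mem]
      intro x hx
      exact (List.not_mem_nil) ((hm x).mpr hx)
    subst this
    simp [PySem.List.max?]
  | cons v t =>
    rw [PySem.List.max?_id_cons]
    simp only [Option.getD_some]
    set M := t.foldl max v with hM
    have hMm : M ∈ le := (hm M).mp (by
      rcases PySem.List.foldl_max_mem t v with h | h
      · rw [← hM] at h; rw [h]; exact List.mem_cons_self
      · rw [← hM] at h; exact List.mem_cons_of_mem v h)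
    have hMax : ∀ y ∈ le, y ≤ M := by
      intro y hy
      have hyv : y ∈ v :: t := (hm y).mpr hy
      have := PySem.List.max?_isMax (PySem.List.max?_id_cons v t) y hyv
      simpa using this
    obtain ⟨hR0, hRub⟩ := PySem.List.le_foldl_max le 0
    rcases PySem.List.foldl_max_mem le 0 with h | h
    · rw [h]
      have := hRub M hMm
      rw [h] at this
      omega
    · have h1 : le.foldl max 0 ≤ M := hMax _ h
      have h2 : M ≤ le.foldl max 0 := hRub M hMm
      omega

-- the maximal value is attained in a nonempty list
theorem maxD_mem (cc : List Int) (hne : cc ≠ []) :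
    (PySem.List.max? cc (fun x => x)).getD 0 ∈ cc := by
  cases h : PySem.List.max? cc (fun x => x) with
  | none => exact absurd ((PySem.List.max?_eq_none_iff cc _).mp h) hne
  | some m =>
    simp only [Option.getD_some]
    exact PySem.List.max?_mem h

-- f of B = first max position = head of the ascending max-position list
theorem index?_eq_head_maxIndices (cc : List Int) (mx : Int) (hm : mx ∈ cc) :
    ((((PySem.List.index? cc mx).getD 0 : Nat)) : Int) = (maxIndices cc mx).head?.getD 0 := by
  obtain ⟨k0, hk0⟩ : ∃ k0, PySem.List.index? cc mx = some k0 := by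
    cases h : PySem.List.index? cc mx with
    | none => rw [PySem.List.index?_eq_none_iff] at h; exact absurd hm h
    | some k0 => exact ⟨k0, rfl⟩
  obtain ⟨hlt, hv, hmin⟩ := PySem.List.getElem_of_index?_eq_some hk0
  have hp := pairwise_maxIndices cc mx
  have hk0m : ((k0 : Nat) : Int) ∈ maxIndices cc mx := by
    rw [mem_maxIndices]; exact ⟨k0, hlt, rfl, hv⟩
  have hne : maxIndices cc mx ≠ [] := by
    intro h; rw [h] at hk0m; simp at hk0m
  have hmem := head_mem_of_ne_nil _ hne
  obtain ⟨kk0, hkk0, hEq, hvk⟩ := (mem_maxIndices cc mx _).mp hmem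
  have h1 : ((maxIndices cc mx).head?.getD 0) ≤ (k0 : Int) :=
    head_le_of_pairwise _ hp _ hk0m
  have h2 : ¬ (kk0 < k0) := fun hh => hmin kk0 hh hvk
  rw [hk0]
  simp only [Option.getD_some]
  omega

-- l of B = last max position = getLast of the ascending max-position list

-- l of B = last max position = getLast of the ascending max-position list
theorem rindex?_eq_getLast_maxIndices (cc : List Int) (mx : Int) (hm : mx ∈ cc) :
    (cc.length : Int) - 1 - (((PySem.List.index? cc.reverse mx).getD 0 : Nat) : Int)
      = (maxIndices cc mx).getLast?.getD 0 := by
  obtain ⟨r, hr⟩ : ∃ r, PySem.List.index? cc.reverse mx = some r := by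
    cases h : PySem.List.index? cc.reverse mx with
    | none => rw [PySem.List.index?_eq_none_iff] at h; exact absurd (List.mem_reverse.mpr hm) h
    | some r => exact ⟨r, rfl⟩
  obtain ⟨hlt, hv, hmin⟩ := PySem.List.getElem_of_index?_eq_some hr
  rw [List.length_reverse] at hlt
  have hvr : cc[cc.length - 1 - r]'(by omega) = mx := by
    rw [← hv, List.getElem_reverse]
  have hp := pairwise_maxIndices cc mx
  have hm0 : ((cc.length - 1 - r : Nat) : Int) ∈ maxIndices cc mx := by
    rw [mem_maxIndices]; exact ⟨cc.length - 1 - r, by omega, rfl, hvr⟩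
  have hne : maxIndices cc mx ≠ [] := by
    intro h; rw [h] at hm0; simp at hm0
  have hmem := getLast_mem_of_ne_nil _ hne
  obtain ⟨jj, hjj, hEq, hvj⟩ := (mem_maxIndices cc mx _).mp hmem
  have h1 : ((cc.length - 1 - r : Nat) : Int) ≤ (maxIndices cc mx).getLast?.getD 0 :=
    le_getLast_of_pairwise _ hp _ hm0
  have hvrev : cc.reverse[cc.length - 1 - jj]'(by rw [List.length_reverse]; omega) = mx := by
    rw [List.getElem_reverse]
    have : cc.length - 1 - (cc.length - 1 - jj) = jj := by omega
    simp only [this]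
    exact hvj
  have h2 : ¬ (cc.length - 1 - jj < r) := fun hh => hmin _ hh hvrev
  rw [hr]
  simp only [Option.getD_some]
  omega

-- the eligibility disjunction is the complement of a window: below l-gap+1 or above f+gap-1

-- the eligibility disjunction is the complement of a window around the extreme max positions
theorem interval_iff (k f l j : Int) (hfl : f ≤ l) :
    ((j ≠ f ∧ |j - f| ≥ k) ∨ (j ≠ l ∧ |j - l| ≥ k)) ↔
      (j < l - (max k 1) + 1 ∨ j ≥ f + (max k 1)) := by
  rcases abs_cases (j - f) with ⟨h1, h2⟩ | ⟨h1, h2⟩ <;>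
    rcases abs_cases (j - l) with ⟨h3, h4⟩ | ⟨h3, h4⟩ <;>
      rw [h1, h3] <;> omega

-- A's stage-2 candidate values are exactly the values at eligible positions
theorem mem_vals_iff (k : Int) (cc : List Int) (mx : Int) (hne : maxIndices cc mx ≠ []) (x : Int) :
    x ∈ ((((maxIndices cc mx).flatMap (fun t => (PySem.List.pyRange 0 (cc.length : Int)).map (fun j => (t, j)))).filter
        (fun p => decide (p.1 ≠ p.2 ∧ |p.1 - p.2| > k - 1))).map
      (fun p => PySem.List.pyGetD cc p.2 0)) ↔
    ∃ (jj : Nat) (h : jj < cc.length),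
      (((jj : Int) ≠ (maxIndices cc mx).head?.getD 0 ∧ |(jj : Int) - (maxIndices cc mx).head?.getD 0| ≥ k) ∨
       ((jj : Int) ≠ (maxIndices cc mx).getLast?.getD 0 ∧ |(jj : Int) - (maxIndices cc mx).getLast?.getD 0| ≥ k)) ∧
      x = cc[jj] := by
  constructor
  · intro hx
    obtain ⟨p, hpf, hpx⟩ := List.mem_map.mp hx
    obtain ⟨hpflat, hpcond⟩ := List.mem_filter.mp hpf
    obtain ⟨t, htm, hpt⟩ := List.mem_flatMap.mp hpflat
    obtain ⟨j, hjr, rfl⟩ := List.mem_map.mp hpt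
    obtain ⟨hj0, hjL⟩ := PySem.List.mem_pyRange_one.mp hjr
    simp only [decide_eq_true_eq] at hpcond
    obtain ⟨htj, hgap⟩ := hpcond
    simp only at htj hgap hpx
    have hkk : j.toNat < cc.length := by omega
    have hge : |t - j| ≥ k := by linarith
    have hC := (elig_iff cc mx k j hne).mp ⟨t, htm, htj, hge⟩
    refine ⟨j.toNat, hkk, ?_, ?_⟩
    · rw [show ((j.toNat : Nat) : Int) = j by omega]
      exact hC
    · rw [← hpx, PySem.List.pyGetD_of_nonneg cc 0 hj0, List.getD_eq_getElem cc 0 hkk]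
  · rintro ⟨jj, hjj, hC, rfl⟩
    obtain ⟨t, htm, htj, hgap⟩ := (elig_iff cc mx k (jj : Int) hne).mpr hC
    apply List.mem_map.mpr
    refine ⟨(t, (jj : Int)), List.mem_filter.mpr ⟨?_, ?_⟩, ?_⟩
    · exact List.mem_flatMap.mpr ⟨t, htm,
        List.mem_map.mpr ⟨(jj : Int), PySem.List.mem_pyRange_one.mpr ⟨by omega, by omega⟩, rfl⟩⟩
    · simp only [decide_eq_true_eq]
      exact ⟨htj, by linarith⟩
    · simp only
      rw [PySem.List.pyGetD_of_nonneg cc 0 (by omega), Int.toNat_natCast,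
        List.getD_eq_getElem cc 0 hjj]

-- stage 2: B's two slice maxima compute max 0 (A's product-scan maximum)
theorem second_eq (k : Int) (cc : List Int) (mx : Int)
    (hne : maxIndices cc mx ≠ []) :
    bSecond k ((maxIndices cc mx).head?.getD 0) ((maxIndices cc mx).getLast?.getD 0) cc
      = max 0 (aSecond k cc (maxIndices cc mx)) := by
  set idx := maxIndices cc mx with hidx
  set f := idx.head?.getD 0 with hf
  set l := idx.getLast?.getD 0 with hl
  have hp : idx.Pairwise (· < ·) := pairwise_maxIndices cc mx
  have hfl : f ≤ l := le_getLast_of_pairwise idx hp f (head_mem_of_ne_nil idx hne)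
  have hf0 : 0 ≤ f := by
    obtain ⟨kk0, _, hEq, _⟩ := (mem_maxIndices cc mx f).mp (head_mem_of_ne_nil idx hne)
    omega
  have hlL : l < (cc.length : Int) := by
    obtain ⟨kk0, hk0, hEq, _⟩ := (mem_maxIndices cc mx l).mp (getLast_mem_of_ne_nil idx hne)
    omega
  have hccne : cc ≠ [] := by
    intro h; subst h; simp at hlL; omega
  unfold bSecond aSecond
  simp only
  have hkkmax : (if k > 1 then k else 1) = max k 1 := by split_ifs <;> omega
  rw [hkkmax]
  set kk := max k 1 with hkk
  have hkk1 : 1 ≤ kk := by omega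
  set lo := l - kk + 1 with hlo
  -- left slice as a take, folded from 0
  have hstep1 : (if lo > 0 then
      max 0 ((PySem.List.max? (PySem.List.slice cc none (some lo)) (fun x => x)).getD 0)
    else (0 : Int)) = (cc.take lo.toNat).foldl max 0 := by
    split_ifs with hpos
    · rw [PySem.List.slice_to cc (by omega)]
      cases htk : cc.take lo.toNat with
      | nil =>
        exfalso
        have hlt := List.length_take (i := lo.toNat) (l := cc)
        rw [htk] at hlt
        simp only [List.length_nil] at hlt
        have hL : 0 < cc.length := List.length_pos_iff.mpr hccne
        omega
      | cons v t =>
        rw [PySem.List.max?_id_cons]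
        simp only [Option.getD_some, List.foldl_cons]
        rw [show (max (0 : Int) v) = max 0 v from rfl, foldl_max_comm]
    · have : lo.toNat = 0 := by omega
      rw [this]
      simp
  rw [hstep1]
  -- right slice as a drop, folded from the accumulated value
  have hstep2 : ∀ (s1 : Int), (if f + kk < (cc.length : Int) then
      max s1 ((PySem.List.max? (PySem.List.slice cc (some (f + kk)) none) (fun x => x)).getD 0)
    else s1) = (cc.drop (f + kk).toNat).foldl max s1 := by
    intro s1
    split_ifs with hlt
    · rw [PySem.List.slice_from cc (by omega)]
      cases hdr : cc.drop (f + kk).toNat with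
      | nil =>
        exfalso
        have hld := List.length_drop (i := (f + kk).toNat) (l := cc)
        rw [hdr] at hld
        simp only [List.length_nil] at hld
        omega
      | cons w u =>
        rw [PySem.List.max?_id_cons]
        simp only [Option.getD_some, List.foldl_cons]
        rw [foldl_max_comm]
    · have : cc.drop (f + kk).toNat = [] := by
        apply List.drop_eq_nil_of_le
        omega
      rw [this]
      rfl
  rw [hstep2]
  rw [← List.foldl_append]
  apply foldl_max_eq_of_mem_iff
  intro x
  rw [mem_vals_iff k cc mx hne x]
  rw [← hidx, ← hf, ← hl]
  constructor
  · rintro ⟨jj, hjj, hC, rfl⟩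
    have hI := (interval_iff k f l (jj : Int) hfl).mp hC
    rw [List.mem_append]
    rcases hI with hlt | hge
    · left
      rw [List.mem_iff_getElem]
      have hjlt : jj < lo.toNat := by omega
      refine ⟨jj, by simp [List.length_take]; omega, ?_⟩
      rw [List.getElem_take]
    · right
      rw [List.mem_iff_getElem]
      have hd : (f + kk).toNat ≤ jj := by omega
      refine ⟨jj - (f + kk).toNat, by simp [List.length_drop]; omega, ?_⟩
      rw [List.getElem_drop]
      congr 1
      omega
  · intro hx
    rw [List.mem_append] at hx
    rcases hx with hx | hx
    · rw [List.mem_iff_getElem] at hx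
      obtain ⟨i, hi, rfl⟩ := hx
      simp only [List.length_take] at hi
      have hiL : i < cc.length := by omega
      refine ⟨i, hiL, ?_, ?_⟩
      · apply (interval_iff k f l (i : Int) hfl).mpr
        left
        omega
      · rw [List.getElem_take]
    · rw [List.mem_iff_getElem] at hx
      obtain ⟨i, hi, rfl⟩ := hx
      simp only [List.length_drop] at hi
      have hiL : (f + kk).toNat + i < cc.length := by omega
      refine ⟨(f + kk).toNat + i, hiL, ?_, ?_⟩
      · apply (interval_iff k f l _ hfl).mpr
        right
        omega
      · rw [List.getElem_drop]

theorem aSecond_pos (k : Int) (cc : List Int) (times : List Int)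
    (j t : Nat) (hj : j < cc.length) (_ht : t < cc.length)
    (hpos : cc[j] > 0) (htm : (t : Int) ∈ times) (hne : (t : Int) ≠ (j : Int))
    (hgap : |(t : Int) - (j : Int)| ≥ k) : aSecond k cc times > 0 := by
  unfold aSecond
  set vals := ((times.flatMap (fun t => (PySem.List.pyRange 0 (cc.length : Int)).map (fun j => (t, j)))).filter
        (fun p => decide (p.1 ≠ p.2 ∧ |p.1 - p.2| > k - 1))).map
      (fun p => PySem.List.pyGetD cc p.2 0) with hvals
  have hmem : cc[j] ∈ vals := by
    rw [hvals]
    apply List.mem_map.mpr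
    refine ⟨((t : Int), (j : Int)), List.mem_filter.mpr ⟨?_, ?_⟩, ?_⟩
    · exact List.mem_flatMap.mpr ⟨(t : Int), htm,
        List.mem_map.mpr ⟨(j : Int), PySem.List.mem_pyRange_one.mpr ⟨by omega, by omega⟩, rfl⟩⟩
    · simp only [decide_eq_true_eq]
      exact ⟨hne, by linarith⟩
    · simp only
      rw [PySem.List.pyGetD_of_nonneg cc 0 (by omega), Int.toNat_natCast,
        List.getD_eq_getElem cc 0 hj]
  cases hmx : PySem.List.max? vals (fun x => x) with
  | none =>
    rw [PySem.List.max?_eq_none_iff] at hmx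
    rw [hmx] at hmem
    simp at hmem
  | some M =>
    have := PySem.List.max?_isMax hmx cc[j] hmem
    simp only [Option.getD_some]
    simp only at this
    omega

theorem stage3_eq (n k : Int) (cc : List Int)
    (h : (0 ≤ k ∧ n ≤ (cc.length : Int)) ∨ n ≤ k) :
    aStage3 n k cc = bStage3 n k cc := by
  by_cases hnk : n ≤ k
  · -- empty range on both sides
    unfold aStage3 bStage3
    rw [PySem.List.pyRange_one_eq_nil (by omega)]
    rfl
  · obtain ⟨hk0, hnL⟩ : 0 ≤ k ∧ n ≤ (cc.length : Int) := by
      rcases h with h | h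
      · exact h
      · omega
    unfold aStage3 bStage3
    apply PySem.List.foldl_congr_mem
    intro acc i hi
    obtain ⟨hi0, hilt⟩ := PySem.List.mem_pyRange_one.mp hi
    have hik : i + k < n := by omega
    rw [if_pos hik]
    congr 1
    -- max of the slice = suffix-max entry
    have h0ik : (0 : Int) ≤ i + k := by omega
    have h0n : (0 : Int) ≤ n := by omega
    have hlen : (PySem.List.slice cc none (some n)).length = n.toNat := by
      rw [PySem.List.slice_to cc h0n]
      simp
      omega
    have hidx : (i + k).toNat < (PySem.List.slice cc none (some n)).length := by
      rw [hlen]; omega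
    have hspec := suffixMax_spec (PySem.List.slice cc none (some n)) (i + k).toNat hidx
    have hdrop : (PySem.List.slice cc none (some n)).drop (i + k).toNat
        = PySem.List.slice cc (some (i + k)) (some n) := by
      rw [PySem.List.slice_to cc h0n, PySem.List.slice_toNat cc h0ik h0n, List.drop_take]
    rw [hdrop] at hspec
    rw [PySem.List.pyGetD_of_nonneg _ 0 h0ik, List.getD_eq_getElem?_getD, hspec]

-- ===== VERDICT (by name: the statement is the Claim_ definition above) =====
theorem find_best_broadcast_spec : Claim_equal_find_best_broadcast := by
  intro n k cc _ hpre
  obtain ⟨hne, hcases⟩ := hpre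
  unfold Spec_find_best_broadcast
  simp only [find_best_broadcast, find_best_broadcast_alt]
  set mx := (PySem.List.max? cc (fun x => x)).getD 0 with hmx
  have hm : mx ∈ cc := maxD_mem cc hne
  rw [index?_eq_head_maxIndices cc mx hm, rindex?_eq_getLast_maxIndices cc mx hm]
  set idx := maxIndices cc mx with hidx
  set f := idx.head?.getD 0 with hf
  set l := idx.getLast?.getD 0 with hl
  have hp : idx.Pairwise (· < ·) := pairwise_maxIndices cc mx
  have hine : idx ≠ [] := maxIndices_ne_nil cc hne
  have hs1 := stage1_iff k idx hp hine
  by_cases hc : f ≠ l ∧ l - f ≥ k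
  · rw [if_pos (hs1.mpr hc), if_pos hc]
  · rw [if_neg (fun hb => hc (hs1.mp hb)), if_neg hc]
    have hsec : bSecond k f l cc = max 0 (aSecond k cc idx) := second_eq k cc mx hine
    by_cases h2 : aSecond k cc idx > 0
    · rw [if_pos h2, if_pos (by rw [hsec]; omega)]
      rw [hsec]
      omega
    · rw [if_neg h2, if_neg (by rw [hsec]; omega)]
      apply stage3_eq
      rcases hcases with hfire1 | hfire2 | hgood | hgood
      · -- two far-apart maxima would have fired stage 1
        exfalso
        obtain ⟨i, hiR, j, hjR, hij, hiv, hjv, hgap⟩ := hfire1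
        rw [List.mem_range] at hiR hjR
        have him : (i : Int) ∈ idx := by
          rw [hidx, mem_maxIndices]
          exact ⟨i, hiR, rfl, by rw [← List.getD_eq_getElem cc 0 hiR]; exact hiv⟩
        have hjm : (j : Int) ∈ idx := by
          rw [hidx, mem_maxIndices]
          exact ⟨j, hjR, rfl, by rw [← List.getD_eq_getElem cc 0 hjR]; exact hjv⟩
        have h1 := head_le_of_pairwise idx hp _ him
        have h2' := le_getLast_of_pairwise idx hp _ hjm
        rw [← hf] at h1
        rw [← hl] at h2'
        apply hc
        constructor
        · have : (i : Int) < (j : Int) := by omega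
          omega
        · omega
      · -- a positive far partner would have fired stage 2
        exfalso
        obtain ⟨j, hjR, hjpos, t, htR, htv, htj, hgap⟩ := hfire2
        rw [List.mem_range] at hjR htR
        apply h2
        apply aSecond_pos k cc idx j t hjR htR
        · rw [← List.getD_eq_getElem cc 0 hjR]; exact hjpos
        · rw [hidx, mem_maxIndices]
          exact ⟨t, htR, rfl, by rw [← List.getD_eq_getElem cc 0 htR]; exact htv⟩
        · exact_mod_cast fun hh => htj (by exact_mod_cast hh)
        · exact hgap
      · exact Or.inl hgood
      · exact Or.inr hgood
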